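-- pv_equiv track=rewrite | github.com/aryangupta2940/AI-desktop-assistant | assistant.py | process_command
-- ===== SOURCE A (Python) =====
-- def process_command(command):
--     command = command.lower()
--
--     if any(word in command for word in ["search", "find", "look up"]):
--         return "search"
--
--     elif any(word in command for word in ["open", "go to", "launch"]):
--         return "open"
--
--     elif "time" in command:
--         return "time"
--
--     else:
--         return "unknown"
-- ===== SOURCE B (Python) =====
-- # Position-driven scan: walk the command once; at each position record the best
-- # (lowest) priority of any keyword starting there; map priority -> label.
-- KEYWORDS = (("search", 0), ("find", 0), ("look up", 0),
--             ("open", 1), ("go to", 1), ("launch", 1),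
--             ("time", 2))
-- LABELS = ("search", "open", "time", "unknown")
--
-- def process_command(command):
--     cmd = command.lower()
--     best = 3
--     for i in range(len(cmd)):
--         for kw, p in KEYWORDS:
--             if p < best and cmd.startswith(kw, i):
--                 best = p
--     return LABELS[best]
-- ===== Notes on version B (the rewrite author's own statement) =====
-- stated objective: alternative
-- what changed: Replaced A's keyword-driven chain of whole-string substring tests by a single position-driven scan of the text that checks which keywords start at each position and keeps the minimum rule priority, mapped to a label at the end.
import Mathlib
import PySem

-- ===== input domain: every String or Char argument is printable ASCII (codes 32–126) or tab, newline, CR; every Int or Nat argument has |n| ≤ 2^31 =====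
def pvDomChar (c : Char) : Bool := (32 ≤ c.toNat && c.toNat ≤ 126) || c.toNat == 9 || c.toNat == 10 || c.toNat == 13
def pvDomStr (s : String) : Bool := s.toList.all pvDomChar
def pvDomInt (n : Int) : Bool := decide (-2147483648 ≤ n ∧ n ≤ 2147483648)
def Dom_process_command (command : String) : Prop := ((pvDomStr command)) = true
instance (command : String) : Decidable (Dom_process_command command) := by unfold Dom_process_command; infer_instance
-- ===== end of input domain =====

-- B replaces A's keyword-driven substring tests by a single position-driven scan keeping the minimum matched rule priority (alternative algorithm, same cost).

-- ===== PORT A =====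
def process_command (command : String) : String :=
  let command := PySem.Str.lower command
  if ["search", "find", "look up"].any (fun word => PySem.Str.isIn word command) then
    "search"
  else if ["open", "go to", "launch"].any (fun word => PySem.Str.isIn word command) then
    "open"
  else if PySem.Str.isIn "time" command then
    "time"
  else
    "unknown"

-- ===== PORT B =====
def pcKeywords : List (String × Nat) :=
  [("search", 0), ("find", 0), ("look up", 0),
   ("open", 1), ("go to", 1), ("launch", 1),
   ("time", 2)]

def pcLabels : List String := ["search", "open", "time", "unknown"]

-- Python's `cmd.startswith(kw, i)` is ported as `kw.toList.isPrefixOf` on the suffix at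
-- position i (exact: both test the keyword's characters against the text from position i);
-- the `for i in range(len(cmd))` loop is the structural recursion over the suffixes.
def pcScan : List Char → Nat → Nat
  | [], best => best
  | c :: rest, best =>
      pcScan rest
        (pcKeywords.foldl
          (fun b kp => if kp.2 < b && kp.1.toList.isPrefixOf (c :: rest) then kp.2 else b) best)

-- `LABELS[best]` is exact via getD: best is always ≤ 3, so the index is in range.
def process_command_alt (command : String) : String :=
  let cmd := PySem.Str.lower command
  pcLabels.getD (pcScan cmd.toList 3) "unknown"

-- ===== PRECONDITION & SPEC =====
def Spec_process_command (command : String) (out : String) : Prop := out = process_command_alt command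
instance (command : String) (out : String) : Decidable (Spec_process_command command out) := by unfold Spec_process_command; infer_instance

-- ===== CLAIM (what is proved, stated in full; the proofs are below) =====
def Claim_equal_process_command : Prop := ∀ (command : String), Dom_process_command command → Spec_process_command command (process_command command)

-- ===== LEMMAS AND PROOFS =====

-- minimum priority of a keyword starting at the head of s (3 = none)
def pcP (s : List Char) : Nat :=
  if "search".toList.isPrefixOf s || "find".toList.isPrefixOf s || "look up".toList.isPrefixOf s then 0
  else if "open".toList.isPrefixOf s || "go to".toList.isPrefixOf s || "launch".toList.isPrefixOf s then 1
  else if "time".toList.isPrefixOf s then 2 else 3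

-- minimum priority of a keyword occurring anywhere in l (3 = none)
def pcBest (l : List Char) : Nat :=
  if PySem.Chars.isIn "search".toList l || PySem.Chars.isIn "find".toList l || PySem.Chars.isIn "look up".toList l then 0
  else if PySem.Chars.isIn "open".toList l || PySem.Chars.isIn "go to".toList l || PySem.Chars.isIn "launch".toList l then 1
  else if PySem.Chars.isIn "time".toList l then 2 else 3

theorem pc_step (p b : Nat) (pre : Bool) :
    (if p < b && pre then p else b) = if pre then min b p else b := by
  cases pre
  · simp
  · simp only [Bool.and_true, if_true, decide_eq_true_eq]
    split_ifs <;> omega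

theorem pc_inner_eq (s : List Char) (b : Nat) (hb : b ≤ 3) :
    pcKeywords.foldl
      (fun b kp => if kp.2 < b && kp.1.toList.isPrefixOf s then kp.2 else b) b
      = min b (pcP s) := by
  simp only [pcKeywords, List.foldl, pc_step, pcP]
  cases h1 : "search".toList.isPrefixOf s <;>
  cases h2 : "find".toList.isPrefixOf s <;>
  cases h3 : "look up".toList.isPrefixOf s <;>
  cases h4 : "open".toList.isPrefixOf s <;>
  cases h5 : "go to".toList.isPrefixOf s <;>
  cases h6 : "launch".toList.isPrefixOf s <;>
  cases h7 : "time".toList.isPrefixOf s <;>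
  simp <;> omega

theorem pc_isIn_cons (kw : List Char) (c : Char) (rest : List Char) :
    PySem.Chars.isIn kw (c :: rest) = (kw.isPrefixOf (c :: rest) || PySem.Chars.isIn kw rest) := by
  rw [Bool.eq_iff_iff]
  simp [PySem.Chars.isIn_iff_infix, List.infix_cons_iff, List.isPrefixOf_iff_prefix]

set_option maxHeartbeats 2000000 in
theorem pcBest_cons (c : Char) (rest : List Char) :
    pcBest (c :: rest) = min (pcP (c :: rest)) (pcBest rest) := by
  simp only [pcBest, pcP, pc_isIn_cons]
  generalize "search".toList.isPrefixOf (c :: rest) = a1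
  generalize "find".toList.isPrefixOf (c :: rest) = a2
  generalize "look up".toList.isPrefixOf (c :: rest) = a3
  generalize "open".toList.isPrefixOf (c :: rest) = a4
  generalize "go to".toList.isPrefixOf (c :: rest) = a5
  generalize "launch".toList.isPrefixOf (c :: rest) = a6
  generalize "time".toList.isPrefixOf (c :: rest) = a7
  generalize PySem.Chars.isIn "search".toList rest = b1
  generalize PySem.Chars.isIn "find".toList rest = b2
  generalize PySem.Chars.isIn "look up".toList rest = b3
  generalize PySem.Chars.isIn "open".toList rest = b4
  generalize PySem.Chars.isIn "go to".toList rest = b5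
  generalize PySem.Chars.isIn "launch".toList rest = b6
  generalize PySem.Chars.isIn "time".toList rest = b7
  revert a1 a2 a3 a4 a5 a6 a7 b1 b2 b3 b4 b5 b6 b7
  decide

theorem pcScan_eq (l : List Char) : ∀ b, b ≤ 3 → pcScan l b = min b (pcBest l) := by
  induction l with
  | nil =>
      intro b hb
      have h3 : pcBest [] = 3 := by decide
      simp only [pcScan, h3]
      omega
  | cons c rest ih =>
      intro b hb
      rw [pcScan, pc_inner_eq _ _ hb, ih _ (by omega : min b (pcP (c :: rest)) ≤ 3), pcBest_cons]
      omega

theorem pc_final (b1 b2 b3 b4 b5 b6 b7 : Bool) :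
    (if b1 || (b2 || b3) then "search"
     else if b4 || (b5 || b6) then "open"
     else if b7 then "time" else "unknown")
    = pcLabels.getD
        (min 3 (if b1 || b2 || b3 then 0 else if b4 || b5 || b6 then 1 else if b7 then 2 else 3))
        "unknown" := by
  revert b1 b2 b3 b4 b5 b6 b7
  decide

-- ===== VERDICT (by name: the statement is the Claim_ definition above) =====
theorem process_command_spec : Claim_equal_process_command := by
  intro command _
  unfold Spec_process_command process_command process_command_alt
  dsimp only
  rw [pcScan_eq _ 3 (by norm_num)]
  simp only [List.any, Bool.or_false, PySem.Str.isIn_eq]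
  unfold pcBest
  exact pc_final _ _ _ _ _ _ _
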